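-- pv_equiv track=rewrite | github.com/DivineJK/MyPythonLibrary | MathLibrary/Convolution/Convolution_or.py | fmt0
-- ===== SOURCE A (Python) =====
-- def fmt0(f, modulo=0):
--     n = len(f)
--     bin_top = 1
--     depth = 0
--     while bin_top < n:
--         depth += 1
--         bin_top <<= 1
--     res = [0]*bin_top
--     for i in range(n):
--         res[i] = f[i]
--     for i in range(depth):
--         offset = 1 << (i+1)
--         for j in range(0, bin_top, offset):
--             for k in range(1<<i):
--                 res[j+k+(1<<i)] -= res[j+k]
--                 if modulo:
--                     if res[j+k+(1<<i)] < 0: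
--                         res[j+k+(1<<i)] += modulo
--     return res
-- ===== SOURCE B (Python) =====
-- def fmt0(f, modulo=0):
--     bin_top = 1
--     while bin_top < len(f):
--         bin_top <<= 1
--     arr = f + [0] * (bin_top - len(f))
--
--     def rec(a):
--         if len(a) == 1:
--             return a
--         h = len(a) // 2
--         lo = rec(a[:h])
--         hi = rec(a[h:])
--         out = lo[:]
--         for x, y in zip(lo, hi):
--             t = y - x
--             if modulo and t < 0:
--                 t += modulo
--             out.append(t)
--         return out
--
--     return rec(arr)
-- ===== Notes on version B (the rewrite author's own statement) =====
-- stated objective: alternative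
-- what changed: Replaces the triple-nested in-place butterfly loops over bit layers with a recursive divide-and-conquer: pad to a power of two, transform the two halves recursively, then combine with a single zip subtraction (same one-shot modulo correction).
import Mathlib
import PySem

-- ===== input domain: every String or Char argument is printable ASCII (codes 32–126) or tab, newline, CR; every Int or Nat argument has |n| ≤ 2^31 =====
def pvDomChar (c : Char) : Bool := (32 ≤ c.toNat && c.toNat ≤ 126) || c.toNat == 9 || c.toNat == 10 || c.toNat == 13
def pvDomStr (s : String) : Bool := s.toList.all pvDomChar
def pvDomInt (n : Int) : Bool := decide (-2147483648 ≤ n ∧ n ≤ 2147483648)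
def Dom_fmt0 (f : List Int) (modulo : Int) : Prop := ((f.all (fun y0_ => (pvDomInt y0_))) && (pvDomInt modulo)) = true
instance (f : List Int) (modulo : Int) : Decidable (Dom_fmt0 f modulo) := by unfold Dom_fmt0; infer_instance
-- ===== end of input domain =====

-- B replaces A's triple-nested in-place bit-layer loops by a recursive divide-and-conquer
-- (pad, transform halves, combine by one zip subtraction); objective: alternative (same cost).

-- ===== PORT A =====
-- 'while bin_top < n: depth += 1; bin_top <<= 1' ported as well-founded recursion on n - bin_top;
-- the guard 0 < bt only makes the recursion total (bt starts at 1 and only doubles).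
def fmt0BT (n bt d : Nat) : Nat × Nat :=
  if h : 0 < bt ∧ bt < n then fmt0BT n (2 * bt) (d + 1) else (bt, d)
  termination_by n - bt
  decreasing_by omega

-- All list indices below are provably in range (j + k + 2^i < bin_top = list length), so
-- List.getD/List.set are exact ports of Python's res[...] reads/writes (no IndexError reachable).
-- range(0, bin_top, offset) with offset > 0 is ported as (List.range ⌈bin_top/offset⌉).map (· * offset),
-- exact for a positive step starting at 0.
def fmt0 (f : List Int) (modulo : Int) : List Int :=
  let n := f.length
  let bd := fmt0BT n 1 0
  let bin_top := bd.1
  let depth := bd.2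
  let res : List Int := List.replicate bin_top 0
  let res := (List.range n).foldl (fun r i => r.set i (f.getD i 0)) res
  (List.range depth).foldl (fun r i =>
    let offset := 2 ^ (i + 1)
    ((List.range ((bin_top + offset - 1) / offset)).map (· * offset)).foldl (fun r j =>
      (List.range (2 ^ i)).foldl (fun r k =>
        let r1 := r.set (j + k + 2 ^ i) (r.getD (j + k + 2 ^ i) 0 - r.getD (j + k) 0)
        if modulo ≠ 0 then
          if r1.getD (j + k + 2 ^ i) 0 < 0 then
            r1.set (j + k + 2 ^ i) (r1.getD (j + k + 2 ^ i) 0 + modulo)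
          else r1
        else r1) r) r) res

-- ===== PORT B =====
def fmt0AltBT (n bt : Nat) : Nat :=
  if h : 0 < bt ∧ bt < n then fmt0AltBT n (2 * bt) else bt
  termination_by n - bt
  decreasing_by omega

def fmt0Rec (modulo : Int) (a : List Int) : List Int :=
  if h : a.length ≤ 1 then a
  else
    let hl := a.length / 2
    let lo := fmt0Rec modulo (a.take hl)
    let hi := fmt0Rec modulo (a.drop hl)
    lo ++ List.zipWith (fun x y =>
      let t := y - x
      if modulo ≠ 0 ∧ t < 0 then t + modulo else t) lo hi
  termination_by a.length
  decreasing_by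
  · simp; omega
  · simp; omega

def fmt0_alt (f : List Int) (modulo : Int) : List Int :=
  let bin_top := fmt0AltBT f.length 1
  fmt0Rec modulo (f ++ List.replicate (bin_top - f.length) 0)

-- ===== PRECONDITION & SPEC =====
def Spec_fmt0 (f : List Int) (modulo : Int) (out : List Int) : Prop := out = fmt0_alt f modulo
instance (f : List Int) (modulo : Int) (out : List Int) : Decidable (Spec_fmt0 f modulo out) := by unfold Spec_fmt0; infer_instance

-- ===== CLAIM (what is proved, stated in full; the proofs are below) =====
def Claim_equal_fmt0 : Prop := ∀ (f : List Int) (modulo : Int), Dom_fmt0 f modulo → Spec_fmt0 f modulo (fmt0 f modulo)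

-- ===== LEMMAS AND PROOFS =====

def pvStep (m x y : Int) : Int :=
  let t := y - x
  if m ≠ 0 ∧ t < 0 then t + m else t
def pvBody (m : Int) (s j : Nat) (r : List Int) (k : Nat) : List Int :=
  let r1 := r.set (j + k + s) (r.getD (j + k + s) 0 - r.getD (j + k) 0)
  if m ≠ 0 then
    if r1.getD (j + k + s) 0 < 0 then
      r1.set (j + k + s) (r1.getD (j + k + s) 0 + m)
    else r1
  else r1

theorem pvBody_eq_set (m : Int) (s j k : Nat) (r : List Int) (hidx : j + k + s < r.length) :
    pvBody m s j r k = r.set (j + k + s) (pvStep m (r.getD (j + k) 0) (r.getD (j + k + s) 0)) := by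
  unfold pvBody pvStep
  simp only [List.getD, List.getElem?_set_self, hidx, if_pos, List.set_set]
  split_ifs with h1 h2 h3 h4 <;> simp_all <;> omega

theorem pvInit (f : List Int) (r : List Int) (m : Nat) (hm : m ≤ f.length)
    (hr : m ≤ r.length) :
    (List.range m).foldl (fun r i => r.set i (f.getD i 0)) r = f.take m ++ r.drop m := by
  induction m with
  | zero => simp
  | succ t ih =>
    rw [List.range_succ, List.foldl_append, ih (by omega) (by omega)]
    simp only [List.foldl_cons, List.foldl_nil]
    have hlt : t < f.length := by omega
    have hrt : t < r.length := by omega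
    have hA : (f.take t).length = t := by simp; omega
    rw [List.set_append_right _ _ (by omega : (f.take t).length ≤ t)]
    rw [hA, Nat.sub_self]
    rw [List.drop_eq_getElem_cons hrt]
    simp only [List.set_cons_zero]
    rw [← List.take_concat_get hlt, List.concat_eq_append, List.append_assoc]
    simp [List.getD, List.getElem?_eq_getElem hlt]

theorem pvKloop (m : Int) (s j : Nat) (r : List Int) (t : Nat) (ht : t ≤ s)
    (hlen : j + 2 * s ≤ r.length) :
    (List.range t).foldl (pvBody m s j) r =
      r.take (j + s) ++ (List.zipWith (pvStep m) ((r.drop j).take t) ((r.drop (j + s)).take t)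
        ++ r.drop (j + s + t)) := by
  induction t with
  | zero => simp
  | succ t ih =>
    rw [List.range_succ, List.foldl_append, ih (by omega)]
    simp only [List.foldl_cons, List.foldl_nil]
    have hA : (r.take (j+s)).length = j + s := by simp; omega
    have hX : ((r.drop j).take t).length = t := by simp; omega
    have hY : ((r.drop (j+s)).take t).length = t := by simp; omega
    have hZ : (List.zipWith (pvStep m) ((r.drop j).take t) ((r.drop (j + s)).take t)).length = t := by
      simp [List.length_zipWith, hX, hY]
    have hlen2 : j + s + t < r.length := by omega
    rw [pvBody_eq_set m s j t _
      (by simp only [List.length_append, hA, hZ, List.length_drop]; omega)]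
    rw [(show j + t + s = j + s + t by omega)]
    -- getD at j + t : inside the take part
    have g1 : (r.take (j + s) ++ (List.zipWith (pvStep m) ((r.drop j).take t) ((r.drop (j + s)).take t)
        ++ r.drop (j + s + t))).getD (j + t) 0 = r.getD (j + t) 0 := by
      rw [List.getD_append _ _ _ _ (by rw [hA]; omega)]
      simp only [List.getD]
      rw [List.getElem?_take_of_lt (show j + t < j + s by omega)]
    -- getD at (j+s) + t : head of the drop part
    have g2 : (r.take (j + s) ++ (List.zipWith (pvStep m) ((r.drop j).take t) ((r.drop (j + s)).take t)
        ++ r.drop (j + s + t))).getD (j + s + t) 0 = r.getD (j + s + t) 0 := by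
      rw [List.getD_append_right _ _ _ _ (by rw [hA]; omega), hA]
      rw [List.getD_append_right _ _ _ _ (by rw [hZ]; omega), hZ]
      rw [(show j + s + t - (j + s) - t = 0 from by omega)]
      simp [List.getD, List.getElem?_drop]
    rw [g1, g2]
    -- the set at j + s + t replaces the head of the drop part
    rw [List.set_append_right _ _ (by rw [hA]; omega), hA]
    rw [List.set_append_right _ _ (by rw [hZ]; omega), hZ]
    rw [(show j + s + t - (j + s) - t = 0 from by omega)]
    rw [List.drop_eq_getElem_cons hlen2, List.set_cons_zero]
    congr 1
    -- zip part: take (t+1) = take t ++ [elem]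
    rw [← List.take_concat_get (by simp; omega : t < (r.drop j).length),
        ← List.take_concat_get (by simp; omega : t < (r.drop (j+s)).length),
        List.concat_eq_append, List.concat_eq_append]
    rw [List.zipWith_append (by rw [hX, hY])]
    simp only [List.zipWith_cons_cons, List.zipWith_nil_right, List.append_assoc,
      List.getElem_drop]
    rw [(show j + s + t + 1 = j + s + (t + 1) by omega)]
    congr 2
    simp [List.getD, List.getElem?_eq_getElem hlen2,
      List.getElem?_eq_getElem (show j + t < r.length by omega)]

def pvBlock (m : Int) (s : Nat) (r : List Int) (j : Nat) : List Int :=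
  (List.range s).foldl (pvBody m s j) r

def pvLayer (m : Int) (s : Nat) : Nat → List Int → List Int
  | 0, r => r
  | q + 1, r =>
      (r.take s ++ List.zipWith (pvStep m) (r.take s) ((r.drop s).take s))
        ++ pvLayer m s q (r.drop (2 * s))

theorem pvBlock_closed (m : Int) (s j : Nat) (r : List Int) (hlen : j + 2 * s ≤ r.length) :
    pvBlock m s r j =
      r.take (j + s) ++ (List.zipWith (pvStep m) ((r.drop j).take s) ((r.drop (j + s)).take s)
        ++ r.drop (j + 2 * s)) := by
  rw [pvBlock, pvKloop m s j r s le_rfl hlen, (show j + s + s = j + 2 * s by omega)]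

theorem pvBlock_shift (m : Int) (s : Nat) (pre r : List Int) (hlen : 2 * s ≤ r.length) :
    pvBlock m s (pre ++ r) pre.length = pre ++ pvBlock m s r 0 := by
  rw [pvBlock_closed m s pre.length (pre ++ r) (by simp; omega),
      pvBlock_closed m s 0 r (by omega)]
  rw [List.take_append, List.drop_left, List.drop_append, List.drop_append]
  rw [List.take_of_length_le (by omega : pre.length ≤ pre.length + s)]
  rw [List.drop_of_length_le (by omega : pre.length ≤ pre.length + s)]
  rw [List.drop_of_length_le (by omega : pre.length ≤ pre.length + 2 * s)]
  simp

theorem pvLayer_length (m : Int) (s : Nat) :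
    ∀ (q : Nat) (r : List Int), r.length = q * (2 * s) → (pvLayer m s q r).length = r.length := by
  intro q
  induction q with
  | zero => intro r h; rfl
  | succ t ih =>
    intro r h
    rw [Nat.succ_mul] at h
    have hd : (r.drop (2 * s)).length = t * (2 * s) := by
      rw [List.length_drop, h]; omega
    simp only [pvLayer, List.length_append, List.length_zipWith, List.length_take,
      List.length_drop, ih (r.drop (2 * s)) hd, h]
    omega

theorem pvLayer_split (m : Int) (s : Nat) :
    ∀ (q1 q2 : Nat) (x y : List Int), x.length = q1 * (2 * s) →
    pvLayer m s (q1 + q2) (x ++ y) = pvLayer m s q1 x ++ pvLayer m s q2 y := by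
  intro q1
  induction q1 with
  | zero =>
    intro q2 x y hx
    have : x = [] := List.eq_nil_of_length_eq_zero (by omega)
    subst this; simp [pvLayer]
  | succ t ih =>
    intro q2 x y hx
    rw [Nat.succ_mul] at hx
    have h2s : 2 * s ≤ x.length := by omega
    have hs : s ≤ x.length := by omega
    rw [(show t + 1 + q2 = (t + q2) + 1 by omega)]
    simp only [pvLayer]
    rw [List.drop_append_of_le_length h2s,
        List.drop_append_of_le_length hs,
        List.take_append_of_le_length hs,
        List.take_append_of_le_length (show s ≤ (x.drop s).length by simp; omega)]
    rw [ih q2 (x.drop (2 * s)) y (by rw [List.length_drop, hx]; omega)]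
    simp [List.append_assoc]

theorem pvJloop (m : Int) (s : Nat) (hs : 0 < s) :
    ∀ (q : Nat) (pre r : List Int), r.length = q * (2 * s) →
    ((List.range q).map (fun t => pre.length + t * (2 * s))).foldl (fun r j => pvBlock m s r j)
        (pre ++ r) = pre ++ pvLayer m s q r := by
  intro q
  induction q with
  | zero =>
    intro pre r h
    have : r = [] := List.eq_nil_of_length_eq_zero (by omega)
    subst this; simp [pvLayer]
  | succ q ih =>
    intro pre r h
    rw [Nat.succ_mul] at h
    have h2s : 2 * s ≤ r.length := by omega
    rw [List.range_succ_eq_map, List.map_cons, List.foldl_cons, List.map_map]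
    rw [(show pre.length + 0 * (2 * s) = pre.length by omega)]
    rw [pvBlock_shift m s pre r h2s]
    rw [pvBlock_closed m s 0 r (by omega)]
    simp only [Nat.zero_add, List.drop_zero, (show 0 + s = s from by omega),
      (show 0 + 2 * s = 2 * s from by omega)]
    have hC : (r.take s ++ List.zipWith (pvStep m) (r.take s) ((r.drop s).take s)).length
        = 2 * s := by
      simp only [List.length_append, List.length_zipWith, List.length_take, List.length_drop]
      omega
    have hfun : ((fun t => pre.length + t * (2 * s)) ∘ Nat.succ)
        = fun t => (pre ++ (r.take s ++ List.zipWith (pvStep m) (r.take s) ((r.drop s).take s))).length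
            + t * (2 * s) := by
      funext t
      simp only [Function.comp, List.length_append, hC, Nat.succ_eq_add_one]
      ring
    rw [(show pre ++ (r.take s ++ (List.zipWith (pvStep m) (r.take s) ((r.drop s).take s)
          ++ r.drop (2 * s)))
        = (pre ++ (r.take s ++ List.zipWith (pvStep m) (r.take s) ((r.drop s).take s)))
          ++ r.drop (2 * s) from by simp)]
    rw [hfun, ih _ (r.drop (2 * s)) (by rw [List.length_drop]; omega)]
    simp [pvLayer]

theorem pvPowSplit (d i : Nat) (h : i < d) : 2 ^ (d - 1 - i) * (2 * 2 ^ i) = 2 ^ d := by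
  rw [(show 2 * 2 ^ i = 2 ^ (i + 1) from by rw [pow_succ]; ring), ← pow_add]
  congr 1; omega

theorem pvF_length (m : Int) (d : Nat) :
    ∀ (d' : Nat), d' ≤ d → ∀ (a : List Int), a.length = 2 ^ d →
    ((List.range d').foldl (fun r i => pvLayer m (2 ^ i) (2 ^ (d - 1 - i)) r) a).length = 2 ^ d := by
  intro d'
  induction d' with
  | zero => intro _ a h; simpa using h
  | succ t ih =>
    intro ht a h
    rw [List.range_succ, List.foldl_append, List.foldl_cons, List.foldl_nil]
    rw [pvLayer_length m (2 ^ t) (2 ^ (d - 1 - t)) _ (by rw [ih (by omega) a h, ← pvPowSplit d t (by omega)])]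
    exact ih (by omega) a h

theorem pvFoldSplit (m : Int) (d : Nat) :
    ∀ (d' : Nat), d' ≤ d → ∀ (x y : List Int), x.length = 2 ^ d → y.length = 2 ^ d →
    (List.range d').foldl (fun r i => pvLayer m (2 ^ i) (2 ^ (d - i)) r) (x ++ y) =
      (List.range d').foldl (fun r i => pvLayer m (2 ^ i) (2 ^ (d - 1 - i)) r) x ++
      (List.range d').foldl (fun r i => pvLayer m (2 ^ i) (2 ^ (d - 1 - i)) r) y := by
  intro d'
  induction d' with
  | zero => intro _ x y hx hy; simp
  | succ t ih =>
    intro ht x y hx hy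
    rw [List.range_succ]
    simp only [List.foldl_append, List.foldl_cons, List.foldl_nil]
    rw [ih (by omega) x y hx hy]
    rw [(show (2:Nat) ^ (d - t) = 2 ^ (d - 1 - t) + 2 ^ (d - 1 - t) from by
      rw [← two_mul, (show 2 * 2 ^ (d - 1 - t) = 2 ^ (d - 1 - t + 1) from by rw [pow_succ]; ring)]
      congr 1; omega)]
    rw [pvLayer_split m (2 ^ t) _ _ _ _
      (by rw [pvF_length m d t (by omega) x hx, ← pvPowSplit d t (by omega)])]

theorem pvLayer_one (m : Int) (s : Nat) (X Y : List Int) (hX : X.length = s)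
    (hY : Y.length = s) : pvLayer m s 1 (X ++ Y) = X ++ List.zipWith (pvStep m) X Y := by
  simp only [pvLayer]
  rw [List.take_append_of_le_length (le_of_eq hX.symm), List.take_of_length_le (le_of_eq hX),
      List.drop_append_of_le_length (le_of_eq hX.symm), List.drop_of_length_le (le_of_eq hX),
      List.nil_append, List.take_of_length_le (le_of_eq hY),
      List.drop_of_length_le (by simp [hX, hY]; omega)]
  simp

theorem pvRec_eq_F (m : Int) : ∀ (d : Nat) (a : List Int), a.length = 2 ^ d →
    fmt0Rec m a = (List.range d).foldl (fun r i => pvLayer m (2 ^ i) (2 ^ (d - 1 - i)) r) a := by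
  intro d
  induction d with
  | zero =>
    intro a h
    rw [fmt0Rec]
    simp [h]
  | succ d ih =>
    intro a h
    have hlen2 : ¬ a.length ≤ 1 := by
      rw [h]; have := Nat.one_lt_two_pow_iff.mpr (show d + 1 ≠ 0 by omega); omega
    rw [fmt0Rec, dif_neg hlen2]
    have hhl : a.length / 2 = 2 ^ d := by rw [h, pow_succ]; omega
    rw [hhl]
    have hx : (a.take (2 ^ d)).length = 2 ^ d := by simp [h, pow_succ]
    have hy : (a.drop (2 ^ d)).length = 2 ^ d := by simp [h, pow_succ]; omega
    simp only [ih _ hx, ih _ hy]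
    conv_rhs =>
      rw [List.range_succ]
      simp only [List.foldl_append, List.foldl_cons, List.foldl_nil, Nat.add_sub_cancel]
      rw [← List.take_append_drop (2 ^ d) a]
    rw [pvFoldSplit m d d le_rfl _ _ hx hy]
    have hX : ((List.range d).foldl (fun r i => pvLayer m (2 ^ i) (2 ^ (d - 1 - i)) r)
        (a.take (2 ^ d))).length = 2 ^ d := pvF_length m d d le_rfl _ hx
    have hY : ((List.range d).foldl (fun r i => pvLayer m (2 ^ i) (2 ^ (d - 1 - i)) r)
        (a.drop (2 ^ d))).length = 2 ^ d := pvF_length m d d le_rfl _ hy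
    rw [(show (2:Nat) ^ (d - d) = 1 from by simp)]
    rw [pvLayer_one m (2 ^ d) _ _ hX hY]
    congr 2

theorem pvBT_fst (n bt d : Nat) : (fmt0BT n bt d).1 = fmt0AltBT n bt := by
  induction bt, d using fmt0BT.induct n with
  | case1 bt d h ih => rw [fmt0BT, fmt0AltBT]; simp only [dif_pos h]; exact ih
  | case2 bt d h => rw [fmt0BT, fmt0AltBT]; simp only [dif_neg h]
theorem pvBT_pow (n bt d : Nat) :
    (fmt0BT n bt d).1 = bt * 2 ^ ((fmt0BT n bt d).2 - d) ∧ d ≤ (fmt0BT n bt d).2 := by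
  induction bt, d using fmt0BT.induct n with
  | case1 bt d h ih =>
    rw [fmt0BT]; simp only [dif_pos h]
    obtain ⟨h1, h2⟩ := ih
    refine ⟨?_, by omega⟩
    rw [h1]
    have : (fmt0BT n (2*bt) (d+1)).2 - d = ((fmt0BT n (2*bt) (d+1)).2 - (d+1)) + 1 := by omega
    rw [this, pow_succ]; ring
  | case2 bt d h => rw [fmt0BT]; simp only [dif_neg h]; simp
theorem pvBT_ge (n bt d : Nat) (h : 0 < bt) : n ≤ (fmt0BT n bt d).1 := by
  revert h
  induction bt, d using fmt0BT.induct n with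
  | case1 bt d h' ih =>
    intro h; rw [fmt0BT]; simp only [dif_pos h']; exact ih (by omega)
  | case2 bt d h' =>
    intro h; rw [fmt0BT]; simp only [dif_neg h']; omega

theorem pvA_layer (m : Int) (d i : Nat) (hi : i < d) (r : List Int) (hr : r.length = 2 ^ d) :
    ((List.range ((2 ^ d + 2 ^ (i + 1) - 1) / 2 ^ (i + 1))).map (· * 2 ^ (i + 1))).foldl
      (fun r j => (List.range (2 ^ i)).foldl (pvBody m (2 ^ i) j) r) r
      = pvLayer m (2 ^ i) (2 ^ (d - 1 - i)) r := by
  have hB : (2:Nat) ^ (i + 1) = 2 * 2 ^ i := by rw [pow_succ]; ring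
  have hq : 2 ^ d = 2 ^ (d - 1 - i) * (2 * 2 ^ i) := (pvPowSplit d i hi).symm
  have hBpos : 0 < 2 * 2 ^ i := by positivity
  have hcount : (2 ^ d + 2 ^ (i + 1) - 1) / 2 ^ (i + 1) = 2 ^ (d - 1 - i) := by
    rw [hB, hq]
    rw [(show 2 ^ (d - 1 - i) * (2 * 2 ^ i) + 2 * 2 ^ i - 1
        = (2 * 2 ^ i - 1) + 2 ^ (d - 1 - i) * (2 * 2 ^ i) from by omega)]
    rw [Nat.add_mul_div_right _ _ hBpos, Nat.div_eq_of_lt (by omega)]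
    omega
  have hfun : ((· * 2 ^ (i + 1)) : Nat → Nat)
      = fun t => ([] : List Int).length + t * (2 * 2 ^ i) := by
    funext t; simp [hB]
  rw [hcount, hfun]
  have := pvJloop m (2 ^ i) (by positivity) (2 ^ (d - 1 - i)) [] r (by rw [hr, hq])
  simpa using this

theorem pvA_eq_F (m : Int) (d : Nat) : ∀ (d' : Nat), d' ≤ d →
    ∀ (r : List Int), r.length = 2 ^ d →
    (List.range d').foldl (fun r i =>
      let offset := 2 ^ (i + 1)
      ((List.range ((2 ^ d + offset - 1) / offset)).map (· * offset)).foldl (fun r j =>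
        (List.range (2 ^ i)).foldl (fun r k =>
          let r1 := r.set (j + k + 2 ^ i) (r.getD (j + k + 2 ^ i) 0 - r.getD (j + k) 0)
          if m ≠ 0 then
            if r1.getD (j + k + 2 ^ i) 0 < 0 then
              r1.set (j + k + 2 ^ i) (r1.getD (j + k + 2 ^ i) 0 + m)
            else r1
          else r1) r) r) r =
    (List.range d').foldl (fun r i => pvLayer m (2 ^ i) (2 ^ (d - 1 - i)) r) r := by
  intro d'
  induction d' with
  | zero => intro _ r _; simp
  | succ t ih =>
    intro ht r hr
    rw [List.range_succ]
    simp only [List.foldl_append, List.foldl_cons, List.foldl_nil]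
    rw [ih (by omega) r hr]
    exact pvA_layer m d t (by omega) _ (pvF_length m d t (by omega) r hr)

theorem pv_main (f : List Int) (modulo : Int) : fmt0 f modulo = fmt0_alt f modulo := by
  have hp := pvBT_pow f.length 1 0
  have hge : f.length ≤ (fmt0BT f.length 1 0).1 := pvBT_ge f.length 1 0 one_pos
  have hB : (fmt0BT f.length 1 0).1 = 2 ^ (fmt0BT f.length 1 0).2 := by
    simpa using hp.1
  have halt : fmt0AltBT f.length 1 = (fmt0BT f.length 1 0).1 := (pvBT_fst f.length 1 0).symm
  rw [fmt0, fmt0_alt, halt]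
  rw [pvInit f _ f.length le_rfl (by simp; omega)]
  rw [List.take_length, List.drop_replicate]
  rw [pvRec_eq_F modulo (fmt0BT f.length 1 0).2 _
    (by simp only [List.length_append, List.length_replicate]; omega)]
  rw [hB]
  exact pvA_eq_F modulo (fmt0BT f.length 1 0).2 (fmt0BT f.length 1 0).2 le_rfl _
    (by simp only [List.length_append, List.length_replicate]; omega)

-- ===== VERDICT (by name: the statement is the Claim_ definition above) =====
theorem fmt0_spec : Claim_equal_fmt0 := by
  intro f modulo _
  unfold Spec_fmt0
  exact pv_main f modulo
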